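-- pv_equiv track=rewrite | github.com/pangalano1983-dev/TudouClaw_new | app/core/memory.py | get_l1_messages
-- ===== SOURCE A (Python) =====
-- def get_l1_messages(messages: list[dict],
--                     max_turns: int = 10) -> list[dict]:
--     """
--     从完整 messages 中提取 L1 窗口（最近 N 轮）。
--
--     一轮 = 一对 user + assistant 消息。
--     system 消息总是保留。tool/tool_calls 消息跟随所属轮次。
--     """
--     if not messages:
--         return []
--
--     # 分离 system 消息
--     system_msgs = []
--     non_system = []
--     for m in messages:
--         if m.get("role") == "system":
--             system_msgs.append(m)
--         else:
--             non_system.append(m)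
--
--     if len(non_system) == 0:
--         return system_msgs
--
--     # 计算轮次：每个 user 消息开始一轮
--     turns: list[list[dict]] = []
--     current_turn: list[dict] = []
--     for m in non_system:
--         if m.get("role") == "user" and current_turn:
--             turns.append(current_turn)
--             current_turn = [m]
--         else:
--             current_turn.append(m)
--     if current_turn:
--         turns.append(current_turn)
--
--     # 只保留最近 max_turns 轮
--     recent_turns = turns[-max_turns:] if len(turns) > max_turns else turns
--     l1_messages = []
--     for turn in recent_turns:
--         l1_messages.extend(turn)
--
--     # system 只保留第一条（最新的 system prompt）
--     result = []
--     if system_msgs: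
--         result.append(system_msgs[0])
--     result.extend(l1_messages)
--     return result
-- ===== SOURCE B (Python) =====
-- def get_l1_messages(messages: list[dict],
--                     max_turns: int = 10) -> list[dict]:
--     if not messages:
--         return []
--     system_msgs = [m for m in messages if m.get("role") == "system"]
--     non_system = [m for m in messages if m.get("role") != "system"]
--     if not non_system:
--         return system_msgs
--     # a turn starts at index 0 and at every user message
--     starts = [i for i, m in enumerate(non_system)
--               if i == 0 or m.get("role") == "user"]
--     recent = starts[-max_turns:] if len(starts) > max_turns else starts
--     head = system_msgs[:1]
--     return head + (non_system[recent[0]:] if recent else [])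
-- ===== Notes on version B (the rewrite author's own statement) =====
-- stated objective: simpler
-- what changed: Instead of materialising a list of turn-lists and re-concatenating the last max_turns of them, B collects the turn-start indices in one comprehension, keeps the last max_turns of those indices, and returns a single tail slice of non_system from the earliest kept index.
import Mathlib
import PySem

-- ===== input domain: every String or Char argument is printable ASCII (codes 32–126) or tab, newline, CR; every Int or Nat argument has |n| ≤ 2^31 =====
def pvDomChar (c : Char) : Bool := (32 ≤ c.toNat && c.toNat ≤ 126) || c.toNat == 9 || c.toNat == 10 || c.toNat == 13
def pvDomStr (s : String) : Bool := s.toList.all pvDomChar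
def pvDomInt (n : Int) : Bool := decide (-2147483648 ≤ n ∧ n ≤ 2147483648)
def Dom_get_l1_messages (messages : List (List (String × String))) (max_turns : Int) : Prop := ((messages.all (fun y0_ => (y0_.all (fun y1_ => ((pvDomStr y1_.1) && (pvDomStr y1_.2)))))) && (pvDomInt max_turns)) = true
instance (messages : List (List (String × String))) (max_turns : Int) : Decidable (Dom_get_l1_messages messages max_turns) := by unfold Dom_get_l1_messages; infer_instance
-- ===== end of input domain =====

-- B keeps the last max_turns turn-START indices and returns one tail slice of non_system,
-- instead of A's list of turn-lists re-concatenated; same value, simpler decomposition.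

-- ===== PORT A =====
-- m.get("role"): first-match lookup in the association list (shared by both ports)
def pvRole (m : List (String × String)) : Option String := PySem.Dict.get? (PySem.Dict.mk m) "role"

def get_l1_messages (messages : List (List (String × String))) (max_turns : Int) : List (List (String × String)) :=
  if messages = [] then []
  else
    let sp := messages.foldl
      (fun (acc : List (List (String × String)) × List (List (String × String))) m =>
        if pvRole m = some "system" then (acc.1 ++ [m], acc.2)
        else (acc.1, acc.2 ++ [m])) ([], [])
    let system_msgs := sp.1
    let non_system := sp.2
    if non_system.length = 0 then system_msgs
    else
      let tp := non_system.foldl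
        (fun (acc : List (List (List (String × String))) × List (List (String × String))) m =>
          if pvRole m = some "user" ∧ acc.2 ≠ [] then (acc.1 ++ [acc.2], [m])
          else (acc.1, acc.2 ++ [m])) ([], [])
      let turns := if tp.2 ≠ [] then tp.1 ++ [tp.2] else tp.1
      let recent := if (turns.length : Int) > max_turns then PySem.List.slice turns (some (-max_turns)) none else turns
      let l1 := recent.foldl (fun acc t => acc ++ t) []
      let result := if system_msgs ≠ [] then [system_msgs.headI] else []
      result ++ l1

-- ===== PORT B =====
def get_l1_messages_alt (messages : List (List (String × String))) (max_turns : Int) : List (List (String × String)) :=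
  if messages = [] then []
  else
    let system_msgs := messages.filter (fun m => pvRole m == some "system")
    let non_system := messages.filter (fun m => !(pvRole m == some "system"))
    if non_system = [] then system_msgs
    else
      let starts := ((PySem.List.enumerate non_system 0).filter
        (fun p => p.1 == 0 || pvRole p.2 == some "user")).map (·.1)
      let recent := if (starts.length : Int) > max_turns then PySem.List.slice starts (some (-max_turns)) none else starts
      let head := PySem.List.slice system_msgs none (some 1)
      head ++ (match recent with
        | [] => []
        | s :: _ => PySem.List.slice non_system (some s) none)

-- ===== PRECONDITION & SPEC =====
def Spec_get_l1_messages (messages : List (List (String × String))) (max_turns : Int) (out : List (List (String × String))) : Prop := out = get_l1_messages_alt messages max_turns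
instance (messages : List (List (String × String))) (max_turns : Int) (out : List (List (String × String))) : Decidable (Spec_get_l1_messages messages max_turns out) := by unfold Spec_get_l1_messages; infer_instance

-- ===== CLAIM (what is proved, stated in full; the proofs are below) =====
def Claim_equal_get_l1_messages : Prop := ∀ (messages : List (List (String × String))) (max_turns : Int), Dom_get_l1_messages messages max_turns → Spec_get_l1_messages messages max_turns (get_l1_messages messages max_turns)

-- ===== LEMMAS AND PROOFS =====

def pvNotUser (m : List (String × String)) : Bool := !(pvRole m == some "user")

def pvTurns (l : List (List (String × String))) : List (List (List (String × String))) :=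
  match l with
  | [] => []
  | m :: rest => (m :: rest.takeWhile pvNotUser) :: pvTurns (rest.dropWhile pvNotUser)
termination_by l.length
decreasing_by
  have := List.length_dropWhile_le pvNotUser rest
  simp; omega

def pvExpB (T : List (List (List (String × String)))) (s : Int) : List Int :=
  match T with
  | [] => []
  | t :: T' => s :: pvExpB T' (s + t.length)

def pvU (l : List (List (String × String))) (s : Int) : List Int :=
  ((PySem.List.enumerate l s).filter (fun p => pvRole p.2 == some "user")).map (·.1)

theorem pvTurns_flatten (l : List (List (String × String))) : (pvTurns l).flatten = l := by
  induction l using pvTurns.induct with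
  | case1 => simp [pvTurns]
  | case2 m rest ih => simp [pvTurns, ih, List.takeWhile_append_dropWhile]

theorem pvExpB_length (T : List (List (List (String × String)))) (s : Int) :
    (pvExpB T s).length = T.length := by
  induction T generalizing s with
  | nil => simp [pvExpB]
  | cons t T' ih => simp [pvExpB, ih]

theorem pvExpB_getElem (T : List (List (List (String × String)))) (s : Int) (k : Nat)
    (hk : k < T.length) :
    (pvExpB T s)[k]'(by rw [pvExpB_length]; exact hk) = s + ((T.take k).flatten.length : Int) := by
  induction T generalizing s k with
  | nil => simp at hk
  | cons t T' ih =>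
    cases k with
    | zero => simp [pvExpB]
    | succ k =>
      have hk' : k < T'.length := by simpa using hk
      have := ih (s + t.length) k hk'
      simp only [pvExpB, List.getElem_cons_succ, List.take_succ_cons, List.flatten_cons,
        List.length_append] at this ⊢
      rw [this]; push_cast; ring

theorem pvDrop_flatten (T : List (List (List (String × String)))) (k : Nat) :
    (T.drop k).flatten = T.flatten.drop ((T.take k).flatten.length) := by
  induction T generalizing k with
  | nil => simp
  | cons t T' ih =>
    cases k with
    | zero => simp
    | succ k =>
      simp only [List.drop_succ_cons, List.take_succ_cons, List.flatten_cons, List.length_append]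
      rw [ih k, List.drop_append]
      have h1 : t.drop (t.length + (T'.take k).flatten.length) = [] :=
        List.drop_eq_nil_of_le (by omega)
      have h2 : t.length + (T'.take k).flatten.length - t.length = (T'.take k).flatten.length := by
        omega
      rw [h1, h2, List.nil_append]

theorem pvFoldA (l : List (List (String × String))) (ts : List (List (List (String × String))))
    (cur : List (List (String × String))) (h : cur ≠ []) :
    (if (l.foldl (fun acc m =>
          if pvRole m = some "user" ∧ acc.2 ≠ [] then (acc.1 ++ [acc.2], [m])
          else (acc.1, acc.2 ++ [m])) (ts, cur)).2 ≠ []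
     then (l.foldl (fun acc m =>
          if pvRole m = some "user" ∧ acc.2 ≠ [] then (acc.1 ++ [acc.2], [m])
          else (acc.1, acc.2 ++ [m])) (ts, cur)).1
          ++ [(l.foldl (fun acc m =>
          if pvRole m = some "user" ∧ acc.2 ≠ [] then (acc.1 ++ [acc.2], [m])
          else (acc.1, acc.2 ++ [m])) (ts, cur)).2]
     else (l.foldl (fun acc m =>
          if pvRole m = some "user" ∧ acc.2 ≠ [] then (acc.1 ++ [acc.2], [m])
          else (acc.1, acc.2 ++ [m])) (ts, cur)).1)
    = ts ++ (cur ++ l.takeWhile pvNotUser) :: pvTurns (l.dropWhile pvNotUser) := by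
  induction l generalizing ts cur with
  | nil => simp [h, pvTurns]
  | cons m t ih =>
    by_cases hu : pvRole m = some "user"
    · have hnu : pvNotUser m = false := by simp [pvNotUser, hu]
      simp only [List.foldl_cons]
      rw [if_pos (show pvRole m = some "user" ∧ cur ≠ [] from ⟨hu, h⟩)]
      rw [ih (ts ++ [cur]) [m] (by simp)]
      simp [pvTurns, hnu]
    · have hnu : pvNotUser m = true := by simp [pvNotUser, hu]
      have hcond : ¬ (pvRole m = some "user" ∧ cur ≠ []) := by tauto
      simp only [List.foldl_cons]
      rw [if_neg hcond]
      rw [ih ts (cur ++ [m]) (by simp)]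
      simp [hnu]

theorem pvFoldPart (l : List (List (String × String)))
    (a b : List (List (String × String))) :
    l.foldl (fun acc m =>
        if pvRole m = some "system" then (acc.1 ++ [m], acc.2)
        else (acc.1, acc.2 ++ [m])) (a, b)
    = (a ++ l.filter (fun m => pvRole m == some "system"),
       b ++ l.filter (fun m => !(pvRole m == some "system"))) := by
  induction l generalizing a b with
  | nil => simp
  | cons m t ih =>
    by_cases hs : pvRole m = some "system"
    · simp [hs, ih]
    · simp [hs, ih]

theorem pvU_append (a b : List (List (String × String))) (s : Int) :
    pvU (a ++ b) s = pvU a s ++ pvU b (s + a.length) := by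
  simp [pvU, PySem.List.enumerate_append, List.filter_append]

theorem pvU_notUser (l : List (List (String × String))) (s : Int)
    (h : ∀ x ∈ l, pvNotUser x = true) : pvU l s = [] := by
  induction l generalizing s with
  | nil => simp [pvU]
  | cons m t ih =>
    have hm : pvNotUser m = true := h m (by simp)
    have hm' : ¬ (pvRole m = some "user") := by simpa [pvNotUser] using hm
    simp only [pvU, PySem.List.enumerate_cons, List.filter_cons] at *
    simp [hm', ih (s + 1) (fun x hx => h x (by simp [hx]))]

theorem pvU_eq_expB (l : List (List (String × String))) :
    ∀ s : Int, l.dropWhile pvNotUser = l → pvU l s = pvExpB (pvTurns l) s := by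
  induction l using pvTurns.induct with
  | case1 => intro s _; simp [pvU, pvTurns, pvExpB]
  | case2 m rest ih =>
    intro s h
    have hm : pvNotUser m = false := by
      by_contra hc
      have hm' : pvNotUser m = true := by simpa using hc
      rw [List.dropWhile_cons_of_pos hm'] at h
      have := List.length_dropWhile_le pvNotUser rest
      have := congrArg List.length h
      simp at this; omega
    have hu : pvRole m = some "user" := by simpa [pvNotUser] using hm
    have h1 : pvU (m :: rest) s = s :: pvU rest (s + 1) := by
      simp [pvU, PySem.List.enumerate_cons, hu]
    have hrest : rest.takeWhile pvNotUser ++ rest.dropWhile pvNotUser = rest :=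
      List.takeWhile_append_dropWhile
    have h2 : pvU rest (s + 1)
        = pvU (rest.dropWhile pvNotUser) (s + 1 + (rest.takeWhile pvNotUser).length) := by
      conv_lhs => rw [← hrest]
      rw [pvU_append, pvU_notUser _ _ (fun x hx => List.mem_takeWhile_imp hx), List.nil_append]
    have h3 := ih (s + 1 + (rest.takeWhile pvNotUser).length)
      (List.dropWhile_idempotent pvNotUser rest)
    rw [h1, h2, h3]
    show _ = pvExpB (pvTurns (m :: rest)) s
    rw [pvTurns]
    simp only [pvExpB, List.length_cons]
    congr 2
    push_cast
    ring

theorem pvBoundaries (m : List (String × String)) (rest : List (List (String × String))) :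
    (((PySem.List.enumerate (m :: rest) 0).filter
        (fun p => p.1 == 0 || pvRole p.2 == some "user")).map (·.1))
    = pvExpB (pvTurns (m :: rest)) 0 := by
  have hf : (PySem.List.enumerate rest 1).filter
        (fun p => p.1 == 0 || pvRole p.2 == some "user")
      = (PySem.List.enumerate rest 1).filter
        (fun p => pvRole p.2 == some "user") := by
    apply List.filter_congr
    intro p hp
    rcases (PySem.List.mem_enumerate_iff _ _ _).1 hp with ⟨k, hk, rfl⟩
    have : ((1 : Int) + k == 0) = false := by simp; omega
    simp [this]
  have h2 : pvU rest 1
      = pvU (rest.dropWhile pvNotUser) (1 + (rest.takeWhile pvNotUser).length) := by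
    conv_lhs => rw [← List.takeWhile_append_dropWhile (p := pvNotUser) (l := rest)]
    rw [pvU_append, pvU_notUser _ _ (fun x hx => List.mem_takeWhile_imp hx), List.nil_append]
  rw [PySem.List.enumerate_cons, List.filter_cons]
  simp only [show ((0 : Int) == 0 || pvRole m == some "user") = true by simp, if_true,
    List.map_cons]
  have h01 : ((0 : Int) + 1) = 1 := by norm_num
  rw [h01, hf]
  have hU : ((PySem.List.enumerate rest 1).filter (fun p => pvRole p.2 == some "user")).map (·.1)
      = pvU rest 1 := rfl
  rw [hU, h2, pvU_eq_expB _ _ (List.dropWhile_idempotent pvNotUser rest), pvTurns]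
  simp only [pvExpB, List.length_cons]
  have harith : 1 + ((rest.takeWhile pvNotUser).length : Int)
      = 0 + (((rest.takeWhile pvNotUser).length + 1 : Nat) : Int) := by push_cast; ring
  rw [harith]

theorem pvFoldA_full (m : List (String × String)) (rest : List (List (String × String))) :
    (if (((m :: rest).foldl (fun acc m =>
          if pvRole m = some "user" ∧ acc.2 ≠ [] then (acc.1 ++ [acc.2], [m])
          else (acc.1, acc.2 ++ [m])) ([], [])).2 ≠ [])
     then ((m :: rest).foldl (fun acc m =>
          if pvRole m = some "user" ∧ acc.2 ≠ [] then (acc.1 ++ [acc.2], [m])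
          else (acc.1, acc.2 ++ [m])) ([], [])).1
          ++ [((m :: rest).foldl (fun acc m =>
          if pvRole m = some "user" ∧ acc.2 ≠ [] then (acc.1 ++ [acc.2], [m])
          else (acc.1, acc.2 ++ [m])) ([], [])).2]
     else ((m :: rest).foldl (fun acc m =>
          if pvRole m = some "user" ∧ acc.2 ≠ [] then (acc.1 ++ [acc.2], [m])
          else (acc.1, acc.2 ++ [m])) ([], [])).1)
    = pvTurns (m :: rest) := by
  have h0 : (m :: rest).foldl (fun acc m =>
        if pvRole m = some "user" ∧ acc.2 ≠ [] then (acc.1 ++ [acc.2], [m])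
        else (acc.1, acc.2 ++ [m])) ([], [])
      = rest.foldl (fun acc m =>
        if pvRole m = some "user" ∧ acc.2 ≠ [] then (acc.1 ++ [acc.2], [m])
        else (acc.1, acc.2 ++ [m])) ([], [m]) := by
    simp
  rw [h0, pvFoldA rest [] [m] (by simp), pvTurns]
  simp

-- system_msgs[:1] equals A's "first element if nonempty"
theorem pvHead (l : List (List (String × String))) :
    (if l ≠ [] then [l.headI] else []) = PySem.List.slice l none (some 1) := by
  rw [show (1 : Int) = ((1 : Nat) : Int) by norm_num, PySem.List.slice_to_natCast]
  cases l <;> simp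

-- the core: flattening the last max_turns turn-lists = tail slice from the
-- head of the identically-sliced start-index list
theorem pvCore (m : List (String × String)) (rest : List (List (String × String))) (mt : Int) :
    (if ((pvTurns (m :: rest)).length : Int) > mt
     then PySem.List.slice (pvTurns (m :: rest)) (some (-mt)) none
     else pvTurns (m :: rest)).foldl (fun acc t => acc ++ t) []
    = (match (if ((pvExpB (pvTurns (m :: rest)) 0).length : Int) > mt
              then PySem.List.slice (pvExpB (pvTurns (m :: rest)) 0) (some (-mt)) none
              else pvExpB (pvTurns (m :: rest)) 0) with
       | [] => ([] : List (List (String × String)))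
       | s :: _ => PySem.List.slice (m :: rest) (some s) none) := by
  set ns := m :: rest with hns
  set T := pvTurns ns with hT
  set E := pvExpB T 0 with hE
  have hlen : E.length = T.length := pvExpB_length T 0
  have hflat : T.flatten = ns := pvTurns_flatten ns
  rw [PySem.List.foldl_append_eq_flatten]
  simp only [List.nil_append]
  by_cases hgt : (T.length : Int) > mt
  · rw [if_pos hgt, if_pos (by rw [hlen]; exact hgt)]
    rw [PySem.List.slice_some_none, PySem.List.slice_some_none, hlen]
    set j := PySem.List.clampIdx T.length (-mt) with hj
    by_cases hjlt : j < T.length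
    · have hjE : j < E.length := by rw [hlen]; exact hjlt
      rw [List.drop_eq_getElem_cons hjE]
      have hval : E[j]'hjE = ((T.take j).flatten.length : Int) := by
        simpa using pvExpB_getElem T 0 j hjlt
      simp only [hval]
      show (T.drop j).flatten
          = PySem.List.slice ns (some (((T.take j).flatten.length : Nat) : Int)) none
      rw [PySem.List.slice_from_natCast, pvDrop_flatten, hflat]
    · rw [List.drop_eq_nil_of_le (by omega), List.drop_eq_nil_of_le (by rw [hlen]; omega)]
      simp
  · rw [if_neg hgt, if_neg (by rw [hlen]; exact hgt)]
    have hEcons : E = 0 :: pvExpB (pvTurns (rest.dropWhile pvNotUser))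
        (0 + ((m :: rest.takeWhile pvNotUser).length : Int)) := by
      rw [hE, hT, hns, pvTurns, pvExpB]
    rw [hEcons]
    show T.flatten = PySem.List.slice ns (some ((0 : Nat) : Int)) none
    rw [PySem.List.slice_from_natCast, List.drop_zero, hflat]

-- ===== VERDICT (by name: the statement is the Claim_ definition above) =====
theorem get_l1_messages_spec : Claim_equal_get_l1_messages := by
  intro messages max_turns _hdom
  unfold Spec_get_l1_messages get_l1_messages get_l1_messages_alt
  by_cases hm : messages = []
  · rw [if_pos hm, if_pos hm]
  · rw [if_neg hm, if_neg hm]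
    rw [pvFoldPart messages [] []]
    simp only [List.nil_append]
    by_cases hns : messages.filter (fun m => !(pvRole m == some "system")) = []
    · rw [if_pos (by rw [hns]; rfl), if_pos hns]
    · rw [if_neg (by simpa [List.length_eq_zero_iff] using hns), if_neg hns]
      cases hc : messages.filter (fun m => !(pvRole m == some "system")) with
      | nil => exact absurd hc hns
      | cons m rest =>
        rw [pvFoldA_full m rest, pvBoundaries m rest]
        congr 1
        · exact pvHead _
        · exact pvCore m rest max_turns
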